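-- pv_equiv track=rewrite | github.com/tomo-playground/sdd-orchestrator | audio/services/text_preprocess.py | _num_to_sino
-- ===== SOURCE A (Python) =====
-- _DIGITS_KO = {
--     "0": "영", "1": "일", "2": "이", "3": "삼", "4": "사",
--     "5": "오", "6": "육", "7": "칠", "8": "팔", "9": "구",
-- }
--
-- _UNITS = ["", "만", "억", "조"]
--
-- _SUB_UNITS = ["", "십", "백", "천"]
--
-- def _num_to_sino(n: int) -> str:
--     """Convert integer to Sino-Korean reading (일이삼...)."""
--     if n == 0:
--         return "영"
--     if n < 0:
--         return "마이너스 " + _num_to_sino(-n)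
--
--     result = []
--     s = str(n)
--     length = len(s)
--
--     for i, ch in enumerate(s):
--         d = int(ch)
--         pos = length - i - 1  # position from right
--         big_unit = pos // 4
--         sub_pos = pos % 4
--
--         # Guard: _UNITS only covers up to 조 (10^16). Fall back to digit-by-digit.
--         if big_unit >= len(_UNITS):
--             return "".join(_DIGITS_KO[c] for c in s)
--
--         if d == 0:
--             # Add big unit marker at 4-digit group boundary if group has non-zero digits
--             if sub_pos == 0 and big_unit > 0:
--                 group_start = max(0, i - 3)
--                 if any(int(s[j]) != 0 for j in range(group_start, i)):
--                     result.append(_UNITS[big_unit])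
--             continue
--
--         if d == 1 and sub_pos > 0:
--             result.append(_SUB_UNITS[sub_pos])
--         else:
--             result.append(_DIGITS_KO[ch] + _SUB_UNITS[sub_pos])
--
--         if sub_pos == 0 and big_unit > 0:
--             result.append(_UNITS[big_unit])
--
--     return "".join(result)
-- ===== SOURCE B (Python) =====
-- _DIGITS_KO = {
--     "0": "영", "1": "일", "2": "이", "3": "삼", "4": "사",
--     "5": "오", "6": "육", "7": "칠", "8": "팔", "9": "구",
-- }
--
-- _UNITS = ["", "만", "억", "조"]
--
-- _SUB_UNITS = ["", "십", "백", "천"]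
--
--
-- def _group_read(g: str) -> str:
--     """Read a group of up to 4 digits, pairing digits with sub-units from the right."""
--     r = ""
--     for ch, sub in zip(reversed(g), _SUB_UNITS):
--         if ch == "0":
--             continue
--         piece = sub if (ch == "1" and sub) else _DIGITS_KO[ch] + sub
--         r = piece + r
--     return r
--
--
-- def _num_to_sino(n: int) -> str:
--     """Convert integer to Sino-Korean reading (일이삼...)."""
--     if n == 0:
--         return "영"
--     if n < 0:
--         return "마이너스 " + _num_to_sino(-n)
--     s = str(n)
--     if len(s) > 16:
--         # beyond 조: digit-by-digit fallback
--         return "".join(_DIGITS_KO[c] for c in s)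
--     # build the reading back-to-front, one 4-digit group at a time
--     out = ""
--     k = 0
--     while s:
--         s, g = s[:-4], s[-4:]
--         r = _group_read(g)
--         if r:
--             out = r + _UNITS[k] + out
--         k += 1
--     return out
-- ===== Notes on version B (the rewrite author's own statement) =====
-- stated objective: alternative
-- what changed: A makes one left-to-right pass over str(n) computing each digit's big-unit/sub-unit from pos//4 and pos%4 with an inner back-scan (range(group_start,i)) to decide unit markers; B instead splits str(n) into 4-digit groups from the right, reads each group by zipping its reversed digits with the sub-unit list, and builds the result string back-to-front, so no position arithmetic and no inner scan are needed.
import Mathlib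
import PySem

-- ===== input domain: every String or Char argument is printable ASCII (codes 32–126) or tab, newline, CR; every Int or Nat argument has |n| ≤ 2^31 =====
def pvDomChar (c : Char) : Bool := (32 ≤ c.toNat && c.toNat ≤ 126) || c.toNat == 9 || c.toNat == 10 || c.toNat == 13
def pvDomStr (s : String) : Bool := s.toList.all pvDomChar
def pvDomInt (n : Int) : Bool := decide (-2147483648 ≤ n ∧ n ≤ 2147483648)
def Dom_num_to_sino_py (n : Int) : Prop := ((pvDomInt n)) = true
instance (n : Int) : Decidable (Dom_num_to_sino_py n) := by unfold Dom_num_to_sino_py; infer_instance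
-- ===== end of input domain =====

-- B replaces A's single left-to-right scan with position arithmetic (pos//4, pos%4 and an inner
-- back-scan for the unit marker) by a right-to-left 4-digit grouping that zips each group's reversed
-- digits with the sub-units and builds the string back-to-front; objective: alternative decomposition.

-- ===== PORT A =====
-- shared module constants: _DIGITS_KO (a literal digit→reading dict used only for lookup on the
-- decimal digit characters of str(n), so modelled as a lookup function), _UNITS, _SUB_UNITS.
-- Strings are handled as List Char (PySem.Chars); the final value is wrapped with String.ofList.
def pvDigitsKo (c : Char) : List Char :=
  if c = '0' then ['영'] else if c = '1' then ['일'] else if c = '2' then ['이']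
  else if c = '3' then ['삼'] else if c = '4' then ['사'] else if c = '5' then ['오']
  else if c = '6' then ['육'] else if c = '7' then ['칠'] else if c = '8' then ['팔']
  else ['구']

def pvUnits : List (List Char) := [[], ['만'], ['억'], ['조']]

def pvSubUnits : List (List Char) := [[], ['십'], ['백'], ['천']]

-- A's 'for i, ch in enumerate(s)' loop over the remaining (i, ch) pairs; 'result' is the list of
-- appended pieces; the early 'return' of the big-unit guard is the first branch.
def pvALoop (s : List Char) (length : Int) : List (Int × Char) → List (List Char) → List Char
  | [], result => PySem.Chars.join [] result
  | (i, ch) :: rest, result =>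
    let d : Int := (ch.toNat : Int) - 48
    let pos : Int := length - i - 1
    let bigUnit : Int := PySem.Int.floordiv pos 4
    let subPos : Int := PySem.Int.mod pos 4
    if (pvUnits.length : Int) ≤ bigUnit then PySem.Chars.join [] (s.map pvDigitsKo)
    else if d = 0 then
      if subPos = 0 ∧ 0 < bigUnit then
        let groupStart : Int := max 0 (i - 3)
        if (PySem.List.pyRange groupStart i 1).any
            (fun j => decide (((PySem.List.pyGetD s j '0').toNat : Int) - 48 ≠ 0)) then
          pvALoop s length rest (result ++ [PySem.List.pyGetD pvUnits bigUnit []])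
        else pvALoop s length rest result
      else pvALoop s length rest result
    else
      let result1 :=
        if d = 1 ∧ 0 < subPos then result ++ [PySem.List.pyGetD pvSubUnits subPos []]
        else result ++ [pvDigitsKo ch ++ PySem.List.pyGetD pvSubUnits subPos []]
      if subPos = 0 ∧ 0 < bigUnit then pvALoop s length rest (result1 ++ [PySem.List.pyGetD pvUnits bigUnit []])
      else pvALoop s length rest result1

def num_to_sino_py (n : Int) : String :=
  if n = 0 then "영"
  else if n < 0 then "마이너스 " ++ num_to_sino_py (-n)
  else
    let s : List Char := PySem.Int.toChars n
    String.ofList (pvALoop s (s.length : Int) (PySem.List.enumerate s 0) [])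
termination_by (if n < 0 then 1 else 0)
decreasing_by simp_all; omega

-- ===== PORT B =====
-- read one ≤4-digit group: zip its reversed digits with the sub-units and prepend each piece
def pvGroupRead (g : List Char) : List Char :=
  ((g.reverse).zip pvSubUnits).foldl
    (fun r p =>
      if p.1 = '0' then r
      else (if p.1 = '1' ∧ p.2 ≠ [] then p.2 else pvDigitsKo p.1 ++ p.2) ++ r)
    []

-- 'while s: s, g = s[:-4], s[-4:]; …' — the slices are take/drop at length-4 from the right
-- (exact: PySem.List.slice_to_neg_ofNat / slice_from_neg_ofNat)
def pvBLoop (s : List Char) (k : Nat) (out : List Char) : List Char :=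
  if s = [] then out
  else
    let g := s.drop (s.length - 4)
    let s' := s.take (s.length - 4)
    let r := pvGroupRead g
    let out' := if r ≠ [] then r ++ PySem.List.pyGetD pvUnits (k : Int) [] ++ out else out
    pvBLoop s' (k + 1) out'
termination_by s.length
decreasing_by
  have hp : 0 < s.length := List.length_pos_iff.mpr (by assumption)
  simp [List.length_take]; omega

def num_to_sino_py_alt (n : Int) : String :=
  if n = 0 then "영"
  else if n < 0 then "마이너스 " ++ num_to_sino_py_alt (-n)
  else
    let s : List Char := PySem.Int.toChars n
    if 16 < s.length then String.ofList (PySem.Chars.join [] (s.map pvDigitsKo))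
    else String.ofList (pvBLoop s 0 [])
termination_by (if n < 0 then 1 else 0)
decreasing_by simp_all; omega

-- ===== PRECONDITION & SPEC =====
def Spec_num_to_sino_py (n : Int) (out : String) : Prop := out = num_to_sino_py_alt n
instance (n : Int) (out : String) : Decidable (Spec_num_to_sino_py n out) := by unfold Spec_num_to_sino_py; infer_instance

-- ===== CLAIM (what is proved, stated in full; the proofs are below) =====
def Claim_equal_num_to_sino_py : Prop := ∀ (n : Int), Dom_num_to_sino_py n → Spec_num_to_sino_py n (num_to_sino_py n)

-- ===== LEMMAS AND PROOFS =====

theorem pvJoinNil (xs : List (List Char)) : PySem.Chars.join [] xs = xs.flatten := by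
  induction xs with
  | nil => rfl
  | cons a t ih =>
    cases t with
    | nil => simp [PySem.Chars.join_singleton]
    | cons b t2 => simp [PySem.Chars.join_cons_cons, ih]

theorem pvChar48 (c : Char) : ((c.toNat : Int) - 48 = 0) ↔ c = '0' := by
  constructor
  · intro h
    have h1 : c.toNat = 48 := by omega
    have h2 : c.val.toNat = 48 := h1
    exact Char.ext (UInt32.toNat_inj.mp (by rw [h2]; rfl))
  · intro h; subst h; rfl

theorem pvChar49 (c : Char) : ((c.toNat : Int) - 48 = 1) ↔ c = '1' := by
  constructor
  · intro h
    have h1 : c.toNat = 49 := by omega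
    have h2 : c.val.toNat = 49 := h1
    exact Char.ext (UInt32.toNat_inj.mp (by rw [h2]; rfl))
  · intro h; subst h; rfl

theorem pvZipTake {α β : Type} (l : List α) (l2 : List β) :
    l.zip (l2.take l.length) = l.zip l2 := by
  induction l generalizing l2 with
  | nil => simp
  | cons a t ih =>
    cases l2 with
    | nil => simp
    | cons b t2 => simp [List.zip_cons_cons, ih]

def pvReadTail : List Char → List Char
  | [] => []
  | c :: cs =>
    (if c = '0' then []
     else if c = '1' ∧ cs ≠ [] then pvSubUnits.getD cs.length []
     else pvDigitsKo c ++ pvSubUnits.getD cs.length []) ++ pvReadTail cs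

theorem pvGroupRead_eq_readTail (g : List Char) (hg : g.length ≤ 4) :
    pvGroupRead g = pvReadTail g := by
  induction g with
  | nil => rfl
  | cons c cs ih =>
    have hcs : cs.length ≤ 3 := by simp at hg; omega
    have hsplit : pvSubUnits = pvSubUnits.take cs.length ++ pvSubUnits.drop cs.length :=
      (List.take_append_drop _ _).symm
    have hdrop : pvSubUnits.drop cs.length
        = pvSubUnits.getD cs.length [] :: pvSubUnits.drop (cs.length + 1) := by
      rw [List.drop_eq_getElem_cons (by simp [pvSubUnits]; omega)]
      congr 1
      rw [List.getD_eq_getElem _ _ (by simp [pvSubUnits]; omega)]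
    have hzip : ((c :: cs).reverse).zip pvSubUnits
        = (cs.reverse.zip pvSubUnits) ++ [(c, pvSubUnits.getD cs.length [])] := by
      rw [List.reverse_cons]
      conv_lhs => rw [hsplit]
      rw [List.zip_append (by simp [pvSubUnits]; omega), hdrop]
      have h1 : cs.reverse.zip (pvSubUnits.take cs.length) = cs.reverse.zip pvSubUnits := by
        have := pvZipTake cs.reverse pvSubUnits
        simpa using this
      simp [h1]
    have hne : (pvSubUnits.getD cs.length [] ≠ []) ↔ cs ≠ [] := by
      interval_cases h : cs.length
      · simp [pvSubUnits, List.length_eq_zero_iff.mp h]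
      all_goals simp [pvSubUnits, show cs ≠ [] from by intro hh; subst hh; simp at h]
    rw [pvGroupRead, hzip, List.foldl_append]
    simp only [List.foldl_cons, List.foldl_nil]
    rw [show (List.foldl
        (fun r p => if p.1 = '0' then r else (if p.1 = '1' ∧ p.2 ≠ [] then p.2 else pvDigitsKo p.1 ++ p.2) ++ r)
        [] (cs.reverse.zip pvSubUnits)) = pvReadTail cs from ih (by omega)]
    rw [pvReadTail]
    simp only [hne]
    by_cases hc0 : c = '0'
    · simp [hc0]
    · simp [hc0]

def pvNz (c : Char) : Bool := decide (((c.toNat : Int) - 48) ≠ 0)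

theorem pvReadTail_eq_nil_iff (g : List Char) (hg : g.length ≤ 4) :
    pvReadTail g = [] ↔ g.any pvNz = false := by
  induction g with
  | nil => simp [pvReadTail]
  | cons c cs ih =>
    have hcs : cs.length ≤ 3 := by simp at hg; omega
    rw [pvReadTail, List.any_cons]
    by_cases hc0 : c = '0'
    · have hz : pvNz c = false := by simp [pvNz, hc0]
      subst hc0
      simp [hz, ih (by omega)]
    · have hnz : ((c.toNat : Int) - 48) ≠ 0 := fun h => hc0 ((pvChar48 c).mp h)
      simp only [if_neg hc0]
      constructor
      · intro h
        exfalso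
        rcases List.append_eq_nil_iff.mp h with ⟨h5, _⟩
        by_cases hc1 : c = '1' ∧ cs ≠ []
        · rw [if_pos hc1] at h5
          have : cs.length ≠ 0 := fun hh => hc1.2 (List.length_eq_zero_iff.mp hh)
          interval_cases h6 : cs.length <;> simp_all [pvSubUnits]
        · rw [if_neg hc1] at h5
          rcases List.append_eq_nil_iff.mp h5 with ⟨h7, _⟩
          have hdk : pvDigitsKo c ≠ [] := by unfold pvDigitsKo; split_ifs <;> simp
          exact hdk h7
      · intro h
        simp [pvNz, hnz] at h

def pvPiece (g : List Char) (m : Nat) : List Char :=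
  if pvGroupRead g = [] then [] else pvGroupRead g ++ pvUnits.getD m []

def pvCanon (s : List Char) (k : Nat) : List Char :=
  if s = [] then []
  else pvCanon (s.take (s.length - 4)) (k + 1) ++ pvPiece (s.drop (s.length - 4)) k
termination_by s.length
decreasing_by
  have hp : 0 < s.length := List.length_pos_iff.mpr (by assumption)
  simp [List.length_take]; omega

theorem pvBLoop_eq_canon (s : List Char) (k : Nat) (out : List Char) :
    pvBLoop s k out = pvCanon s k ++ out := by
  fun_induction pvBLoop s k out with
  | case1 a b => rw [pvCanon]; simp
  | case2 s k out h g s' r out' ih =>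
    rw [pvCanon, if_neg h, pvPiece]
    rw [ih]
    by_cases hr : pvGroupRead (s.drop (s.length - 4)) = []
    · simp [out', r, g, s', hr]
    · simp [out', r, g, s', hr]

theorem pvCanon_peel (m : Nat) : ∀ (t g : List Char), g.length ≤ 4 → t.length = 4 * m →
    ∀ (k : Nat), pvCanon (g ++ t) k = pvPiece g (k + m) ++ pvCanon t k := by
  induction m with
  | zero =>
    intro t g hg ht k
    have ht' : t = [] := List.eq_nil_of_length_eq_zero (by omega)
    subst ht'
    simp only [List.append_nil]
    by_cases hgn : g = []
    · subst hgn
      simp only [Nat.add_zero]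
      rw [pvCanon]
      simp [pvPiece, pvGroupRead]
    · rw [pvCanon, if_neg hgn]
      have h0 : g.length - 4 = 0 := by omega
      rw [h0]
      simp only [List.take_zero, List.drop_zero, Nat.add_zero]
      simp [pvCanon]
  | succ m ih =>
    intro t g hg ht k
    have htn : t ≠ [] := by intro hh; subst hh; simp at ht
    have hgt : g ++ t ≠ [] := by simp [htn]
    rw [pvCanon, if_neg hgt]
    have hlen : (g ++ t).length - 4 = g.length + 4 * m := by simp [List.length_append]; omega
    rw [hlen]
    have htake : (g ++ t).take (g.length + 4 * m) = g ++ t.take (4 * m) :=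
      List.take_length_add_append _
    have hdrop : (g ++ t).drop (g.length + 4 * m) = t.drop (4 * m) :=
      List.drop_length_add_append _
    rw [htake, hdrop]
    rw [ih (t.take (4 * m)) g hg (by simp; omega) (k + 1)]
    conv_rhs => rw [pvCanon]
    rw [if_neg htn]
    have hlt : t.length - 4 = 4 * m := by omega
    rw [hlt]
    have : k + 1 + m = k + (m + 1) := by omega
    rw [this, List.append_assoc]

theorem pvScan (mid : List Char) : ∀ (pre post : List Char) (f : Char → Bool),
    (PySem.List.pyRange (pre.length : Int) ((pre.length : Int) + (mid.length : Int)) 1).any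
        (fun j => f (PySem.List.pyGetD (pre ++ (mid ++ post)) j '0'))
      = mid.any f := by
  induction mid with
  | nil =>
    intro pre post f
    simp [PySem.List.pyRange]
  | cons c mid' ih =>
    intro pre post f
    rw [PySem.List.pyRange_one_cons (by push_cast [List.length_cons]; omega)]
    rw [List.any_cons]
    have h1 : PySem.List.pyGetD (pre ++ (c :: mid' ++ post)) (pre.length : Int) '0' = c := by
      simp [List.getD_eq_getElem?_getD]
    have h2 : pre ++ (c :: mid' ++ post) = (pre ++ [c]) ++ (mid' ++ post) := by
      simp
    have h3 : ((pre.length : Int) + 1) = ((pre ++ [c]).length : Int) := by simp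
    have h4 : ((pre.length : Int) + ((c :: mid').length : Int))
        = ((pre ++ [c]).length : Int) + ((mid'.length : Int)) := by simp; omega
    rw [h1, h2, h4, h3, ih (pre ++ [c]) post f]
    simp

def pvParts (g1 : List Char) : List Char → Nat → List (List Char)
  | [], _ => []
  | c :: g2', m =>
    (if c = '0' then
       (if g2' = [] ∧ 0 < m ∧ g1.any pvNz then [pvUnits.getD m []] else [])
     else
       (if c = '1' ∧ g2' ≠ [] then [pvSubUnits.getD g2'.length []]
        else [pvDigitsKo c ++ pvSubUnits.getD g2'.length []]) ++
       (if g2' = [] ∧ 0 < m then [pvUnits.getD m []] else []))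
    ++ pvParts (g1 ++ [c]) g2' m

theorem pvParts_flatten (g2 : List Char) : ∀ (g1 : List Char) (m : Nat),
    (pvParts g1 g2 m).flatten
      = pvReadTail g2 ++ (if g2 ≠ [] ∧ 0 < m ∧ (g1 ++ g2).any pvNz then pvUnits.getD m [] else []) := by
  induction g2 with
  | nil => intro g1 m; simp [pvParts, pvReadTail]
  | cons c g2' ih =>
    intro g1 m
    rw [pvParts, pvReadTail, List.flatten_append, ih (g1 ++ [c]) m]
    have hany : ((g1 ++ [c]) ++ g2').any pvNz = (g1 ++ (c :: g2')).any pvNz := by simp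
    by_cases hc0 : c = '0'
    · have hpz : pvNz c = false := by simp [pvNz, hc0]
      by_cases hg2 : g2' = []
      · subst hg2
        simp [hc0, pvReadTail, List.any_append]
        by_cases hm : 0 < m
        · simp [hm, show pvNz '0' = false from by decide]
          split_ifs <;> simp
        · simp [hm]
      · simp [hc0, hg2, List.any_append]
    · have hpz : pvNz c = true := by
        simp [pvNz]; intro h; exact hc0 ((pvChar48 c).mp h)
      by_cases hg2 : g2' = []
      · subst hg2
        simp [hc0, hpz, pvReadTail, List.any_append]
        by_cases hm : 0 < m
        · simp [hm]
        · simp [Nat.le_zero.mp (Nat.not_lt.mp hm)]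
      · simp [hc0, hg2, hpz, List.any_append]
        split_ifs <;> simp

theorem pvParts_eq_piece (g : List Char) (hg : g.length ≤ 4) (m : Nat) :
    (pvParts [] g m).flatten = pvPiece g m := by
  rw [pvParts_flatten g [] m]
  simp only [List.nil_append]
  rw [pvPiece, pvGroupRead_eq_readTail g hg]
  have hiff := pvReadTail_eq_nil_iff g hg
  by_cases hany : g.any pvNz = true
  · have hne : pvReadTail g ≠ [] := by
      intro h
      rw [hiff.mp h] at hany
      exact Bool.false_ne_true hany
    rw [if_neg hne]
    have hgn : g ≠ [] := by
      rcases List.any_eq_true.mp hany with ⟨x, hx, _⟩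
      exact List.ne_nil_of_mem hx
    by_cases hm : 0 < m
    · rw [if_pos ⟨hgn, hm, hany⟩]
    · have hm0 : m = 0 := by omega
      subst hm0
      simp [pvUnits]
  · have he : pvReadTail g = [] := by
      rw [hiff]
      simpa using hany
    rw [he, if_pos rfl]
    simp [hany]

theorem pvLemG (g2 : List Char) : ∀ (g1 done t : List Char) (m : Nat) (result : List (List Char)),
    g1.length + g2.length ≤ 4 →
    (g1.length + g2.length = 4 ∨ done = []) →
    t.length = 4 * m → m ≤ 3 →
    pvALoop (done ++ g1 ++ g2 ++ t) ((done.length : Int) + g1.length + g2.length + t.length)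
        (PySem.List.enumerate (g2 ++ t) ((done.length : Int) + g1.length)) result
      = pvALoop (done ++ g1 ++ g2 ++ t) ((done.length : Int) + g1.length + g2.length + t.length)
        (PySem.List.enumerate t ((done.length : Int) + g1.length + g2.length))
        (result ++ pvParts g1 g2 m) := by
  induction g2 with
  | nil => intro g1 done t m result _ _ _ _; simp [pvParts]
  | cons c g2' ih =>
    intro g1 done t m result hlen hfull ht hm
    have hg2' : g2'.length ≤ 3 := by simp at hlen; omega
    rw [List.cons_append, PySem.List.enumerate_cons, pvALoop]
    have hpos : ((done.length : Int) + g1.length + (c :: g2').length + t.length)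
        - ((done.length : Int) + g1.length) - 1 = (g2'.length : Int) + 4 * (m : Int) := by
      push_cast [List.length_cons]; omega
    rw [hpos]
    have hbig : PySem.Int.floordiv ((g2'.length : Int) + 4 * (m : Int)) 4 = (m : Int) := by
      rw [PySem.Int.floordiv_eq_ediv_of_pos (by omega)]; omega
    have hsub : PySem.Int.mod ((g2'.length : Int) + 4 * (m : Int)) 4 = (g2'.length : Int) := by
      rw [PySem.Int.mod_eq_emod_of_pos (by omega)]; omega
    rw [hbig, hsub]
    rw [if_neg (by simp [pvUnits]; omega)]
    have hIH := fun res => ih (g1 ++ [c]) done t m res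
      (by simp at hlen ⊢; omega)
      (by rcases hfull with hf | hf
          · left; simp at hf ⊢; omega
          · right; exact hf)
      ht hm
    have hSS : done ++ (g1 ++ [c]) ++ g2' ++ t = done ++ g1 ++ c :: g2' ++ t := by simp
    have hLL : ((done.length : Int) + (g1 ++ [c]).length + g2'.length + t.length)
        = ((done.length : Int) + g1.length + (c :: g2').length + t.length) := by
      push_cast [List.length_append, List.length_cons, List.length_nil]; ring
    have hst1 : ((done.length : Int) + (g1 ++ [c]).length)
        = (done.length : Int) + g1.length + 1 := by
      push_cast [List.length_append, List.length_cons, List.length_nil]; ring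
    have hst2 : ((done.length : Int) + (g1 ++ [c]).length + g2'.length)
        = (done.length : Int) + g1.length + (c :: g2').length := by
      push_cast [List.length_append, List.length_cons, List.length_nil]; ring
    have hIH' : ∀ res, pvALoop (done ++ g1 ++ c :: g2' ++ t)
          ((done.length : Int) + g1.length + (c :: g2').length + t.length)
          (PySem.List.enumerate (g2' ++ t) ((done.length : Int) + g1.length + 1)) res
        = pvALoop (done ++ g1 ++ c :: g2' ++ t)
          ((done.length : Int) + g1.length + (c :: g2').length + t.length)
          (PySem.List.enumerate t ((done.length : Int) + g1.length + (c :: g2').length))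
          (res ++ pvParts (g1 ++ [c]) g2' m) := by
      intro res
      have h := hIH res
      rw [hSS, hLL, hst2, hst1] at h
      exact h
    by_cases hc0 : c = '0'
    · rw [if_pos (show ((c.toNat : Int) - 48) = 0 from (pvChar48 c).mpr hc0)]
      by_cases hz : g2' = [] ∧ 0 < m
      · obtain ⟨hznil, hzm⟩ := hz
        subst hznil
        rw [if_pos (⟨by simp, by exact_mod_cast hzm⟩ :
          ((([] : List Char).length : Int) = 0 ∧ (0 : Int) < (m : Int)))]
        have hor : g1.length = 3 ∨ done.length = 0 := by
          rcases hfull with hf | hf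
          · left; simp at hf; omega
          · right; simp [hf]
        have hgs : max 0 ((done.length : Int) + (g1.length : Int) - 3) = (done.length : Int) := by
          have hg13 : g1.length ≤ 3 := by simp at hlen; omega
          rcases hor with h3 | h3 <;> omega
        simp only [hgs]
        have hscan : ((PySem.List.pyRange ((done.length : Int)) ((done.length : Int) + (g1.length : Int))).any
            fun j => decide (((PySem.List.pyGetD (done ++ g1 ++ c :: ([] : List Char) ++ t) j '0').toNat : Int) - 48 ≠ 0)) = g1.any pvNz := by
          have h := pvScan g1 done ((c :: ([] : List Char)) ++ t) pvNz
          simpa [pvNz, List.append_assoc] using h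
        rw [hscan]
        by_cases hany : g1.any pvNz = true
        · rw [if_pos hany]
          have h := hIH' (result ++ [PySem.List.pyGetD pvUnits (m : Int) []])
          simp only [List.nil_append] at h ⊢
          rw [h]
          congr 1
          simp [pvParts, hc0, hzm, hany]
        · rw [if_neg hany]
          have h := hIH' result
          simp only [List.nil_append] at h ⊢
          rw [h]
          congr 1
          simp [pvParts, hc0, hzm, hany]
      · rw [if_neg (by
          intro hcon
          exact hz ⟨List.length_eq_zero_iff.mp (by exact_mod_cast hcon.1), by exact_mod_cast hcon.2⟩)]
        rw [hIH' result]
        congr 1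
        rw [pvParts, if_pos hc0, if_neg (fun hcon => hz ⟨hcon.1, hcon.2.1⟩)]
        simp
    · rw [if_neg (fun h => hc0 ((pvChar48 c).mp h))]
      by_cases hg2n : g2' = []
      · subst hg2n
        rw [if_neg (fun hcon => by simpa using hcon.2 :
          ¬ (((c.toNat : Int) - 48) = 1 ∧ (0:Int) < (([] : List Char).length : Int)))]
        by_cases hm0 : 0 < m
        · rw [if_pos (⟨by simp, by exact_mod_cast hm0⟩ :
            ((([] : List Char).length : Int) = 0 ∧ (0 : Int) < (m : Int)))]
          have h := hIH' (result ++ [pvDigitsKo c ++ PySem.List.pyGetD pvSubUnits ((([] : List Char).length : Int)) []] ++ [PySem.List.pyGetD pvUnits (m : Int) []])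
          simp only [List.nil_append] at h ⊢
          rw [h]
          congr 1
          simp [pvParts, hc0, hm0, pvSubUnits]
        · rw [if_neg (by
            intro hcon
            exact hm0 (by exact_mod_cast hcon.2))]
          have h := hIH' (result ++ [pvDigitsKo c ++ PySem.List.pyGetD pvSubUnits ((([] : List Char).length : Int)) []])
          simp only [List.nil_append] at h ⊢
          rw [h]
          congr 1
          simp [pvParts, hc0, hm0, pvSubUnits]
      · have hg2pos : 0 < g2'.length := List.length_pos_iff.mpr hg2n
        have hnz2 : ¬ (((g2'.length : Nat) : Int) = 0 ∧ (0 : Int) < (m : Int)) := by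
          intro hcon
          have : g2'.length = 0 := by exact_mod_cast hcon.1
          omega
        by_cases hc1 : c = '1'
        · rw [if_pos (⟨(pvChar49 c).mpr hc1, by exact_mod_cast hg2pos⟩ :
            (((c.toNat : Int) - 48) = 1 ∧ (0:Int) < ((g2'.length : Nat) : Int)))]
          rw [if_neg hnz2]
          rw [hIH' (result ++ [PySem.List.pyGetD pvSubUnits ((g2'.length : Nat) : Int) []])]
          congr 1
          rw [pvParts, if_neg hc0, if_pos ⟨hc1, hg2n⟩]
          simp [hg2n]
        · rw [if_neg (show ¬ (((c.toNat : Int) - 48) = 1 ∧ (0:Int) < ((g2'.length : Nat) : Int)) from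
            fun hcon => hc1 ((pvChar49 c).mp hcon.1))]
          rw [if_neg hnz2]
          rw [hIH' (result ++ [pvDigitsKo c ++ PySem.List.pyGetD pvSubUnits ((g2'.length : Nat) : Int) []])]
          congr 1
          rw [pvParts, if_neg hc0]
          rw [if_neg (show ¬ (c = '1' ∧ g2' ≠ []) from fun hcon => hc1 hcon.1)]
          simp [hg2n]

theorem pvLemOuter (m : Nat) : ∀ (t g done : List Char) (result : List (List Char)),
    g.length ≤ 4 → (g.length = 4 ∨ done = []) → t.length = 4 * m → m ≤ 3 →
    pvALoop (done ++ g ++ t) ((done.length : Int) + g.length + t.length)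
        (PySem.List.enumerate (g ++ t) (done.length : Int)) result
      = result.flatten ++ pvPiece g m ++ pvCanon t 0 := by
  induction m with
  | zero =>
    intro t g done result hg hfull ht hm
    have ht0 : t = [] := List.eq_nil_of_length_eq_zero (by omega)
    subst ht0
    have h := pvLemG g [] done [] 0 result (by simpa using hg)
      (hfull.imp (fun hf => by simpa using hf) id)
      (by simp) (by omega)
    simp only [List.append_nil, List.length_nil, Nat.cast_zero, add_zero] at h ⊢
    rw [h, PySem.List.enumerate_nil, pvALoop, pvJoinNil, List.flatten_append]
    rw [pvParts_eq_piece g hg 0]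
    rw [pvCanon]
    simp
  | succ m ih =>
    intro t g done result hg hfull ht hm
    have h := pvLemG g [] done t (m + 1) result (by simpa using hg)
      (hfull.imp (fun hf => by simpa using hf) id)
      ht hm
    simp only [List.append_nil, List.length_nil, Nat.cast_zero, add_zero] at h ⊢
    rw [h]
    have htake : (t.take 4).length = 4 := by simp; omega
    have hdrop : (t.drop 4).length = 4 * m := by simp; omega
    have hih := ih (t.drop 4) (t.take 4) (done ++ g) (result ++ pvParts [] g (m + 1))
      (by omega) (Or.inl htake) hdrop (by omega)
    rw [List.take_append_drop 4 t] at hih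
    have hLL : ((done ++ g).length : Int) + ((t.take 4).length : Int) + ((t.drop 4).length : Int)
        = (done.length : Int) + (g.length : Int) + (t.length : Int) := by
      push_cast [List.length_append, htake, hdrop]; omega
    have hss : done ++ g ++ (t.take 4) ++ (t.drop 4) = done ++ g ++ t := by
      rw [List.append_assoc (done ++ g), List.take_append_drop]
    have hstart : (((done ++ g).length : Nat) : Int) = (done.length : Int) + (g.length : Int) := by
      push_cast [List.length_append]; ring
    rw [hss, hLL, hstart] at hih
    rw [hih]
    have hcanon : pvCanon t 0 = pvPiece (t.take 4) m ++ pvCanon (t.drop 4) 0 := by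
      conv_lhs => rw [← List.take_append_drop 4 t]
      rw [pvCanon_peel m (t.drop 4) (t.take 4) (by omega) hdrop 0]
      simp
    rw [hcanon, List.flatten_append, pvParts_eq_piece g hg (m + 1)]
    simp [List.append_assoc]

theorem pvCore (s : List Char) (hs : s.length ≤ 16) :
    pvALoop s (s.length : Int) (PySem.List.enumerate s 0) [] = pvBLoop s 0 [] := by
  have hm3 : (s.length + 3) / 4 - 1 ≤ 3 := by omega
  have hle4 : s.length - 4 * ((s.length + 3) / 4 - 1) ≤ 4 := by omega
  have hsum : (s.length - 4 * ((s.length + 3) / 4 - 1)) + 4 * ((s.length + 3) / 4 - 1)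
      = s.length := by omega
  have hg : (s.take (s.length - 4 * ((s.length + 3) / 4 - 1))).length
      = s.length - 4 * ((s.length + 3) / 4 - 1) := by simp
  have ht : (s.drop (s.length - 4 * ((s.length + 3) / 4 - 1))).length
      = 4 * ((s.length + 3) / 4 - 1) := by simp; omega
  have hout := pvLemOuter ((s.length + 3) / 4 - 1)
    (s.drop (s.length - 4 * ((s.length + 3) / 4 - 1)))
    (s.take (s.length - 4 * ((s.length + 3) / 4 - 1))) [] []
    (by rw [hg]; omega) (Or.inr rfl) ht hm3
  simp only [List.nil_append, List.length_nil, Nat.cast_zero, zero_add, List.flatten_nil] at hout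
  rw [List.take_append_drop] at hout
  have hLL : (((s.take (s.length - 4 * ((s.length + 3) / 4 - 1))).length : Int)
        + ((s.drop (s.length - 4 * ((s.length + 3) / 4 - 1))).length : Int))
      = (s.length : Int) := by
    simp only [hg, ht]
    omega
  rw [hLL] at hout
  rw [hout]
  rw [pvBLoop_eq_canon, List.append_nil]
  conv_rhs => rw [← List.take_append_drop (s.length - 4 * ((s.length + 3) / 4 - 1)) s]
  rw [pvCanon_peel ((s.length + 3) / 4 - 1)
    (s.drop (s.length - 4 * ((s.length + 3) / 4 - 1)))
    (s.take (s.length - 4 * ((s.length + 3) / 4 - 1))) (by rw [hg]; omega) ht 0]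
  simp

theorem pvFallback (s : List Char) (hs : 16 < s.length) :
    pvALoop s (s.length : Int) (PySem.List.enumerate s 0) []
      = PySem.Chars.join [] (s.map pvDigitsKo) := by
  cases s with
  | nil => simp at hs
  | cons c rest =>
    rw [PySem.List.enumerate_cons, pvALoop]
    have hpos : (((c :: rest).length : Nat) : Int) - 0 - 1 = ((rest.length : Nat) : Int) := by
      push_cast [List.length_cons]; omega
    rw [hpos]
    have hrest : 16 ≤ rest.length := by simp at hs; omega
    rw [if_pos (by
      rw [PySem.Int.floordiv_eq_ediv_of_pos (by omega)]
      simp [pvUnits]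
      omega)]

theorem pvPos (n : Int) (hn : 0 < n) : num_to_sino_py n = num_to_sino_py_alt n := by
  rw [num_to_sino_py, num_to_sino_py_alt]
  rw [if_neg (by omega : ¬ n = 0), if_neg (by omega : ¬ n < 0),
      if_neg (by omega : ¬ n = 0), if_neg (by omega : ¬ n < 0)]
  by_cases h16 : 16 < (PySem.Int.toChars n).length
  · rw [if_pos h16]
    exact congrArg String.ofList (pvFallback _ h16)
  · rw [if_neg h16]
    exact congrArg String.ofList (pvCore (PySem.Int.toChars n) (by omega))

-- ===== VERDICT (by name: the statement is the Claim_ definition above) =====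
theorem num_to_sino_py_spec : Claim_equal_num_to_sino_py := by
  intro n _
  unfold Spec_num_to_sino_py
  rcases lt_trichotomy n 0 with h | h | h
  · rw [num_to_sino_py, num_to_sino_py_alt]
    simp only [if_neg (by omega : ¬ n = 0), if_pos h]
    rw [pvPos (-n) (by omega)]
  · subst h; rw [num_to_sino_py, num_to_sino_py_alt]; simp
  · exact pvPos n h
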